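-- pv_equiv track=rewrite | github.com/facurouquaud/Scanning-program | scanner_frontend.py | _str_incr
-- ===== SOURCE A (Python) =====
-- def _str_incr(txt: str):
--     """Incrementa ASCII alfanumericamente SIN checkeo de errores"""
--     txt = txt.upper()
--     if txt == "":  # braks ordering but allows overflowing without errors
--         return "0"
--     if txt[-1] == '9':
--         return txt[:-1] + "A"
--     elif txt[-1] < 'Z':
--         return txt[:-1] + chr(ord(txt[-1]) + 1)
--     else:
--         return _str_incr(txt[:-1]) + "0"
-- ===== SOURCE B (Python) =====
-- def _str_incr(txt: str):
--     """Incrementa ASCII alfanumericamente SIN checkeo de errores"""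
--     txt = txt.upper()
--     if txt == "":
--         return "0"
--     chars = list(txt)
--     for i in range(len(chars) - 1, -1, -1):
--         c = chars[i]
--         if c == '9':
--             chars[i] = 'A'
--             break
--         if c < 'Z':
--             chars[i] = chr(ord(c) + 1)
--             break
--         chars[i] = '0'
--     else:
--         return "0" + "".join(chars)
--     return "".join(chars)
-- ===== Notes on version B (the rewrite author's own statement) =====
-- stated objective: alternative
-- what changed: Replaces A's recursion that rebuilds the string by slicing (txt[:-1] + ...) at every carry with a single right-to-left in-place scan over a char list, joined once at the end.
import Mathlib
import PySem

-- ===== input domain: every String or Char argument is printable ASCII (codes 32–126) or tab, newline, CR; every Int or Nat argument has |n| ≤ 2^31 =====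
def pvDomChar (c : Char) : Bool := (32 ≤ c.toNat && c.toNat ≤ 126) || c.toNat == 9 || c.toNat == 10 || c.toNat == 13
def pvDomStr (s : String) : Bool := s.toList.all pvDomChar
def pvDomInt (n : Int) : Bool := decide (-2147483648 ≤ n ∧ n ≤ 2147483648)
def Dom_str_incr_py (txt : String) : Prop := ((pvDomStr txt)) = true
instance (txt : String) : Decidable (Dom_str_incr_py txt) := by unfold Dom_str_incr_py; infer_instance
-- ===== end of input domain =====

-- B replaces A's slice-rebuilding recursion with one right-to-left scan over a char list (alternative decomposition).

-- ===== PORT A =====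
-- A works on the uppercased string; the recursion peels the last character (txt[:-1]).
def strIncrACore (cs : List Char) : List Char :=
  if h : cs = [] then ['0']
  else
    if cs.getLast h = '9' then cs.dropLast ++ ['A']
    else if cs.getLast h < 'Z' then cs.dropLast ++ [Char.ofNat ((cs.getLast h).toNat + 1)]
    else strIncrACore cs.dropLast ++ ['0']
termination_by cs.length
decreasing_by
  have : cs.length ≠ 0 := fun h0 => h (List.eq_nil_of_length_eq_zero h0)
  simp [List.length_dropLast]; omega

def str_incr_py (txt : String) : String :=
  String.mk (strIncrACore (PySem.Chars.upper txt.toList))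

-- ===== PORT B =====
-- B's loop walks the reversed char list head-first; the Bool records whether the loop broke.
def strIncrBScan : List Char → List Char × Bool
  | [] => ([], false)
  | c :: rest =>
    if c = '9' then ('A' :: rest, true)
    else if c < 'Z' then (Char.ofNat (c.toNat + 1) :: rest, true)
    else
      let (r, b) := strIncrBScan rest
      ('0' :: r, b)

def str_incr_py_alt (txt : String) : String :=
  let cs := PySem.Chars.upper txt.toList
  if cs = [] then "0"
  else
    let (r, broke) := strIncrBScan cs.reverse
    if broke then String.mk r.reverse else String.mk ('0' :: r.reverse)

-- ===== PRECONDITION & SPEC =====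
def Spec_str_incr_py (txt : String) (out : String) : Prop := out = str_incr_py_alt txt
instance (txt : String) (out : String) : Decidable (Spec_str_incr_py txt out) := by unfold Spec_str_incr_py; infer_instance

-- ===== CLAIM (what is proved, stated in full; the proofs are below) =====
def Claim_equal_str_incr_py : Prop := ∀ (txt : String), Dom_str_incr_py txt → Spec_str_incr_py txt (str_incr_py txt)

-- ===== LEMMAS AND PROOFS =====

theorem strIncrACore_eq_scan (rs : List Char) :
    strIncrACore rs.reverse =
      (let (r, b) := strIncrBScan rs
       if b then r.reverse else '0' :: r.reverse) := by
  induction rs with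
  | nil => simp [strIncrACore, strIncrBScan]
  | cons c rest ih =>
    rw [strIncrACore]
    have hne : rest.reverse ++ [c] ≠ [] := by simp
    simp only [List.reverse_cons, dif_neg hne, List.getLast_concat, List.dropLast_concat]
    by_cases h9 : c = '9'
    · simp [strIncrBScan, h9]
    · by_cases hz : c < 'Z'
      · simp [strIncrBScan, h9, hz]
      · simp only [if_neg h9, if_neg hz, ih, strIncrBScan]
        cases hb : strIncrBScan rest with
        | mk r b =>
          cases b <;> simp

-- ===== VERDICT (by name: the statement is the Claim_ definition above) =====
theorem str_incr_py_spec : Claim_equal_str_incr_py := by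
  intro txt _
  unfold Spec_str_incr_py str_incr_py str_incr_py_alt
  set cs := PySem.Chars.upper txt.toList with hcs
  by_cases h : cs = []
  · simp [h, strIncrACore]; rfl
  · have := strIncrACore_eq_scan cs.reverse
    rw [List.reverse_reverse] at this
    simp only [if_neg h, this]
    cases hb : strIncrBScan cs.reverse with
    | mk r b => cases b <;> simp
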